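-- pv_equiv track=rewrite | github.com/OB-UNISA/Algorithm-Design | exercises/exercises2_12.py | alg
-- ===== SOURCE A (Python) =====
-- def alg(a, i, j):
--     if i == j or j - i == 1:
--         return 0
--
--     m = (i + j) // 2
--     if a[m] == a[m + 1] and a[m] == a[m - 1]:
--         return 1 + alg(a, i, m) + alg(a, m, j)
--     elif a[m] == a[m - 1]:
--         return alg(a, i, m) + alg(a, m + 1, j)
--     elif a[m] == a[m + 1]:
--         return alg(a, i, m - 1) + alg(a, m, j)
--     else:
--         return alg(a, i, m - 1) + alg(a, m + 1, j)
-- ===== SOURCE B (Python) =====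
-- def alg(a, i, j):
--     c = 0
--     for k in range(i + 1, j):
--         if a[k - 1] == a[k] == a[k + 1]:
--             c += 1
--     return c
-- ===== Notes on version B (the rewrite author's own statement) =====
-- stated objective: simpler
-- what changed: Replaces the four-way divide-and-conquer recursion by a single linear scan that counts indices k in (i,j) with a[k-1]==a[k]==a[k+1].
-- outside the precondition, e.g. on alg([0, 1], -3, 1): A returns 0, B raises IndexError; on alg([1, 0, 0, 0], -5, 3): A returns 2, B raises IndexError
import Mathlib
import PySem

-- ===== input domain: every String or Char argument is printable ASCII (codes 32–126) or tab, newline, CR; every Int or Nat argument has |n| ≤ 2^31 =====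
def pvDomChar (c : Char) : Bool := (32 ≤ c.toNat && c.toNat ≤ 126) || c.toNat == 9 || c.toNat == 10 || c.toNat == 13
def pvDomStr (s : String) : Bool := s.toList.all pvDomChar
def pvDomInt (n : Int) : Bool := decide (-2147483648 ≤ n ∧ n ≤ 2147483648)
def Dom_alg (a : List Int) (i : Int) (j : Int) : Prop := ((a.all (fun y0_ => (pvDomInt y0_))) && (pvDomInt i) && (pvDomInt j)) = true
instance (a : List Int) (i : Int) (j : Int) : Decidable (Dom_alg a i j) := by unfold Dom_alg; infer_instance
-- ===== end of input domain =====

-- B replaces A's four-way divide-and-conquer recursion by one linear scan counting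
-- indices k in (i,j) with a[k-1]==a[k]==a[k+1]; same value on Pre_, simpler.

-- ===== PORT A =====
-- literal port of A's recursion; element accesses use pyGetD _ _ 0, exact inside Pre_alg.
-- The fuel argument and the '2 ≤ j - i' test are totality guards only: with the fuel alg
-- supplies they are never hit on inputs where the Python returns (each call shrinks
-- (j - i).toNat, and for non-base j - i < 2 the Python recurses without bound).
def algF (a : List Int) (fuel : Nat) (i : Int) (j : Int) : Int :=
  match fuel with
  | 0 => 0
  | fuel + 1 =>
    if i = j ∨ j - i = 1 then 0
    else if 2 ≤ j - i then
      let m := PySem.Int.floordiv (i + j) 2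
      if PySem.List.pyGetD a m 0 = PySem.List.pyGetD a (m + 1) 0 ∧
         PySem.List.pyGetD a m 0 = PySem.List.pyGetD a (m - 1) 0 then
        1 + algF a fuel i m + algF a fuel m j
      else if PySem.List.pyGetD a m 0 = PySem.List.pyGetD a (m - 1) 0 then
        algF a fuel i m + algF a fuel (m + 1) j
      else if PySem.List.pyGetD a m 0 = PySem.List.pyGetD a (m + 1) 0 then
        algF a fuel i (m - 1) + algF a fuel m j
      else
        algF a fuel i (m - 1) + algF a fuel (m + 1) j
    else 0

def alg (a : List Int) (i : Int) (j : Int) : Int :=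
  algF a ((j - i).toNat + 1) i j

-- ===== PORT B =====
-- literal port of Source B: one pass over range(i+1, j) with a counter
def alg_alt (a : List Int) (i : Int) (j : Int) : Int :=
  (PySem.List.pyRange (i + 1) j 1).foldl
    (fun c k =>
      if PySem.List.pyGetD a (k - 1) 0 = PySem.List.pyGetD a k 0 ∧
         PySem.List.pyGetD a k 0 = PySem.List.pyGetD a (k + 1) 0 then c + 1 else c)
    0

-- ===== PRECONDITION & SPEC =====
-- Pre_ excludes j < i (A recurses without bound) and endpoints beyond ±len(a) with j - i ≥ 2,
-- where A raises IndexError or returns a value that is an accident of negative-index wraparound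
-- depth by depth, and B's flat scan raises on such inputs.
def Pre_alg (a : List Int) (i : Int) (j : Int) : Prop :=
  i ≤ j ∧ (j - i ≤ 1 ∨ (-(a.length : Int) ≤ i ∧ j + 1 ≤ (a.length : Int)))
instance (a : List Int) (i : Int) (j : Int) : Decidable (Pre_alg a i j) := by unfold Pre_alg; infer_instance
def pvWitness_alg : List Int × Int × Int := ([1, 1, 1, 2, 2], 0, 4)

def Spec_alg (a : List Int) (i : Int) (j : Int) (out : Int) : Prop := out = alg_alt a i j
instance (a : List Int) (i : Int) (j : Int) (out : Int) : Decidable (Spec_alg a i j out) := by unfold Spec_alg; infer_instance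

-- ===== CLAIM (what is proved, stated in full; the proofs are below) =====
def Claim_equal_alg : Prop := ∀ (a : List Int) (i : Int) (j : Int), Dom_alg a i j → Pre_alg a i j → Spec_alg a i j (alg a i j)

-- ===== LEMMAS AND PROOFS =====

-- midpoint bounds of Python's (i + j) // 2
theorem alg_mid_lemma (i j : Int) (h : 2 ≤ j - i) :
    i + 1 ≤ PySem.Int.floordiv (i + j) 2 ∧ PySem.Int.floordiv (i + j) 2 ≤ j - 1 := by
  rw [PySem.Int.floordiv_eq_ediv_of_pos (by omega)]
  omega

-- the triple test at index k, as B's scan performs it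
def tripB (a : List Int) (k : Int) : Bool :=
  decide (PySem.List.pyGetD a (k - 1) 0 = PySem.List.pyGetD a k 0 ∧
          PySem.List.pyGetD a k 0 = PySem.List.pyGetD a (k + 1) 0)

-- the count of triple indices in [lo, hi)
def cnt (a : List Int) (lo hi : Int) : Int :=
  ((PySem.List.pyRange lo hi 1).countP (tripB a) : Int)

theorem foldl_count (a : List Int) (l : List Int) (c : Int) :
    l.foldl
      (fun c k =>
        if PySem.List.pyGetD a (k - 1) 0 = PySem.List.pyGetD a k 0 ∧
           PySem.List.pyGetD a k 0 = PySem.List.pyGetD a (k + 1) 0 then c + 1 else c)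
      c = c + (l.countP (tripB a) : Int) := by
  induction l generalizing c with
  | nil => simp
  | cons x xs ih =>
      simp only [List.foldl_cons]
      by_cases hx : PySem.List.pyGetD a (x - 1) 0 = PySem.List.pyGetD a x 0 ∧
          PySem.List.pyGetD a x 0 = PySem.List.pyGetD a (x + 1) 0
      · rw [if_pos hx, ih, List.countP_cons]
        have hb : tripB a x = true := by simp [tripB, hx]
        rw [hb]
        simp
        omega
      · rw [if_neg hx, ih, List.countP_cons]
        simp [tripB, hx]

theorem alg_alt_eq_cnt (a : List Int) (i j : Int) : alg_alt a i j = cnt a (i + 1) j := by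
  simpa [alg_alt, cnt] using foldl_count a (PySem.List.pyRange (i + 1) j 1) 0

theorem cnt_nil (a : List Int) (lo hi : Int) (h : hi ≤ lo) : cnt a lo hi = 0 := by
  simp [cnt, PySem.List.pyRange_one_eq_nil h]

-- split the count at a middle index mid (lo ≤ mid < hi)
theorem cnt_split (a : List Int) (lo mid hi : Int) (h1 : lo ≤ mid) (h2 : mid < hi) :
    cnt a lo hi = cnt a lo mid + (if tripB a mid then 1 else 0) + cnt a (mid + 1) hi := by
  unfold cnt
  rw [PySem.List.pyRange_one_append lo mid hi h1 (by omega),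
      PySem.List.pyRange_one_cons h2, List.countP_append, List.countP_cons]
  by_cases ht : tripB a mid
  · simp [ht]
    ring
  · simp [ht]

-- dropping a last index whose triple test fails
theorem cnt_pred (a : List Int) (lo m : Int) (ht : tripB a (m - 1) = false) :
    cnt a lo m = cnt a lo (m - 1) := by
  by_cases h : lo ≤ m - 1
  · have hs := cnt_split a lo (m - 1) m h (by omega)
    have h0 : cnt a (m - 1 + 1) m = 0 := by
      rw [cnt_nil a (m - 1 + 1) m (by omega)]
    rw [ht, h0] at hs
    simpa using hs
  · rw [cnt_nil a lo m (by omega), cnt_nil a lo (m - 1) (by omega)]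

-- dropping a first index whose triple test fails
theorem cnt_succ (a : List Int) (m hi : Int) (ht : tripB a m = false) :
    cnt a m hi = cnt a (m + 1) hi := by
  by_cases h : m < hi
  · unfold cnt
    rw [PySem.List.pyRange_one_cons h, List.countP_cons, ht]
    simp
  · rw [cnt_nil a m hi (by omega), cnt_nil a (m + 1) hi (by omega)]

-- A's recursion computes the scan count, for any sufficient fuel
theorem algF_eq_cnt (a : List Int) (fuel : Nat) (i j : Int)
    (hf : (j - i).toNat < fuel) : algF a fuel i j = cnt a (i + 1) j := by
  induction fuel generalizing i j with
  | zero => omega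
  | succ fuel ih =>
    rw [algF]
    by_cases hbase : i = j ∨ j - i = 1
    · rw [if_pos hbase, cnt_nil a (i + 1) j (by omega)]
    · rw [if_neg hbase]
      by_cases h2 : 2 ≤ j - i
      · rw [if_pos h2]
        have hm := alg_mid_lemma i j h2
        set m := PySem.Int.floordiv (i + j) 2 with hmdef
        have hsplit := cnt_split a (i + 1) m j (by omega) (by omega)
        by_cases hc1 : PySem.List.pyGetD a m 0 = PySem.List.pyGetD a (m + 1) 0 ∧
            PySem.List.pyGetD a m 0 = PySem.List.pyGetD a (m - 1) 0
        · rw [if_pos hc1]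
          have ht : tripB a m = true := by
            simp only [tripB, decide_eq_true_eq]
            exact ⟨hc1.2.symm, hc1.1⟩
          rw [ht] at hsplit
          rw [ih i m (by omega), ih m j (by omega)]
          simp at hsplit
          omega
        · rw [if_neg hc1]
          by_cases hc2 : PySem.List.pyGetD a m 0 = PySem.List.pyGetD a (m - 1) 0
          · rw [if_pos hc2]
            have hne : PySem.List.pyGetD a m 0 ≠ PySem.List.pyGetD a (m + 1) 0 := by
              intro hmm; exact hc1 ⟨hmm, hc2⟩
            have htm : tripB a m = false := by
              simp only [tripB, decide_eq_false_iff_not]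
              intro hx; exact hne hx.2
            have htm1 : tripB a (m + 1) = false := by
              simp only [tripB, decide_eq_false_iff_not]
              intro hx
              have he : (m + 1) - 1 = m := by ring
              rw [he] at hx
              exact hne hx.1
            rw [htm] at hsplit
            rw [ih i m (by omega), ih (m + 1) j (by omega),
                ← cnt_succ a (m + 1) j htm1]
            simp at hsplit
            omega
          · rw [if_neg hc2]
            have htm : tripB a m = false := by
              simp only [tripB, decide_eq_false_iff_not]
              intro hx; exact hc2 hx.1.symm
            have htm1 : tripB a (m - 1) = false := by
              simp only [tripB, decide_eq_false_iff_not]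
              intro hx
              have he : (m - 1) + 1 = m := by ring
              rw [he] at hx
              exact hc2 hx.2.symm
            rw [htm] at hsplit
            simp at hsplit
            by_cases hc3 : PySem.List.pyGetD a m 0 = PySem.List.pyGetD a (m + 1) 0
            · rw [if_pos hc3]
              rw [ih i (m - 1) (by omega), ih m j (by omega),
                  ← cnt_pred a (i + 1) m htm1]
              omega
            · rw [if_neg hc3]
              have htp1 : tripB a (m + 1) = false := by
                simp only [tripB, decide_eq_false_iff_not]
                intro hx
                have he : (m + 1) - 1 = m := by ring
                rw [he] at hx
                exact hc3 hx.1
              rw [ih i (m - 1) (by omega), ih (m + 1) j (by omega),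
                  ← cnt_pred a (i + 1) m htm1, ← cnt_succ a (m + 1) j htp1]
              omega
      · rw [if_neg h2, cnt_nil a (i + 1) j (by omega)]

theorem alg_eq_cnt (a : List Int) (i j : Int) : alg a i j = cnt a (i + 1) j :=
  algF_eq_cnt a ((j - i).toNat + 1) i j (by omega)

-- ===== VERDICT (by name: the statement is the Claim_ definition above) =====
theorem alg_spec : Claim_equal_alg := by
  intro a i j _ _
  unfold Spec_alg
  rw [alg_eq_cnt, alg_alt_eq_cnt]
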